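-- pv_equiv track=rewrite | github.com/yudai-patronai/problembook | problems/sort/zeroes_fixed_pos/solution.py | slow
-- ===== SOURCE A (Python) =====
-- def slow(l):
--     n = len(l)
--
--     for i in range(n - 1):
--         if l[i] == 0:
--             continue
--         m = i
--         for j in range(i, n):
--             if l[j] == 0:
--                 continue
--             if l[j] < l[m]:
--                 m = j
--         if m != i:
--             l[i], l[m] = l[m], l[i]
--
--     return l
-- ===== SOURCE B (Python) =====
-- def slow(l):
--     # B: extract the non-zero values, sort them once, and write them back
--     # into the non-zero positions (zeros stay put). Mutates l in place like A.
--     it = iter(sorted(x for x in l if x != 0))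
--     for i, x in enumerate(l):
--         if x != 0:
--             l[i] = next(it)
--     return l
-- ===== Notes on version B (the rewrite author's own statement) =====
-- stated objective: faster
-- what changed: Replaces the index-based selection sort over non-zero positions by: sort the non-zero values once and write them back into the non-zero positions in one pass.
import Mathlib
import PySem

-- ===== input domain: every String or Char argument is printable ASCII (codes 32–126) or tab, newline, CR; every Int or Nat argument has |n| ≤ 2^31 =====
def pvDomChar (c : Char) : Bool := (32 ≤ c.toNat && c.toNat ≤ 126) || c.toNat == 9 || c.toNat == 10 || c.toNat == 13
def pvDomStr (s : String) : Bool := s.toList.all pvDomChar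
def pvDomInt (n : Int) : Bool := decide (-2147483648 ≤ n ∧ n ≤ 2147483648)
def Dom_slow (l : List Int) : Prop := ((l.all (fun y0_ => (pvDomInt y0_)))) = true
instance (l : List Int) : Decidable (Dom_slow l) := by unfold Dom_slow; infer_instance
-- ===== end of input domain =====

-- B replaces A's O(n^2) in-place selection sort of the non-zero entries by: sort the
-- non-zero values once, then write them back into the non-zero positions in one pass
-- (zeros stay put).  Both Pythons mutate l in place in the same way; the theorems here
-- are about the return value.

-- ===== PORT A =====
-- inner loop: m = i; for j in range(i, n): skip zeros, track the index of the minimum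
def slowInner (s : List Int) (i n : Int) : Int :=
  (PySem.List.pyRange i n 1).foldl (fun m j =>
    if PySem.List.pyGetD s j 0 == 0 then m
    else if PySem.List.pyGetD s j 0 < PySem.List.pyGetD s m 0 then j else m) i

-- one iteration of the outer loop (the swap l[i], l[m] = l[m], l[i])
def slowOuterBody (n : Int) (s : List Int) (i : Int) : List Int :=
  if PySem.List.pyGetD s i 0 == 0 then s
  else
    let m := slowInner s i n
    if m ≠ i then
      PySem.List.pySetD (PySem.List.pySetD s i (PySem.List.pyGetD s m 0)) m
        (PySem.List.pyGetD s i 0)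
    else s

def slow (l : List Int) : List Int :=
  let n : Int := l.length
  (PySem.List.pyRange 0 (n - 1) 1).foldl (slowOuterBody n) l

-- ===== PORT B =====
-- write the sorted non-zero values back into the non-zero slots, zeros kept in place
-- (the vs = [] fallback is unreachable: vs carries one value per non-zero slot)
def slowWriteBack : List Int → List Int → List Int
  | [], _ => []
  | x :: t, vs =>
      if x == 0 then x :: slowWriteBack t vs
      else match vs with
        | v :: vs' => v :: slowWriteBack t vs'
        | [] => x :: slowWriteBack t []

def slow_alt (l : List Int) : List Int :=
  slowWriteBack l (PySem.List.sorted (l.filter (fun x => x != 0)) (fun x => x) false)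

-- ===== PRECONDITION & SPEC =====
def Spec_slow (l : List Int) (out : List Int) : Prop := out = slow_alt l
instance (l : List Int) (out : List Int) : Decidable (Spec_slow l out) := by unfold Spec_slow; infer_instance

-- ===== CLAIM (what is proved, stated in full; the proofs are below) =====
def Claim_equal_slow : Prop := ∀ (l : List Int), Dom_slow l → Spec_slow l (slow l)

-- ===== LEMMAS AND PROOFS =====

-- the sorted non-zero values of u (proof-side abbreviation)
def sortedNZ (u : List Int) : List Int :=
  PySem.List.sorted (u.filter (fun x => x != 0)) (fun x => x) false

lemma wb_cons_zero (t vs : List Int) : slowWriteBack (0 :: t) vs = 0 :: slowWriteBack t vs := by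
  simp [slowWriteBack]

lemma wb_cons_nz (x : Int) (t : List Int) (v : Int) (vs : List Int) (hx : x ≠ 0) :
    slowWriteBack (x :: t) (v :: vs) = v :: slowWriteBack t vs := by
  simp [slowWriteBack, hx]

lemma slowWriteBack_congr (u₁ u₂ w : List Int)
    (hm : u₁.map (fun x => x == 0) = u₂.map (fun x => x == 0))
    (hc : u₁.countP (fun x => x != 0) ≤ w.length) :
    slowWriteBack u₁ w = slowWriteBack u₂ w := by
  induction u₁ generalizing u₂ w with
  | nil =>
    cases u₂ with
    | nil => rfl
    | cons y t' => simp at hm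
  | cons x t ih =>
    cases u₂ with
    | nil => simp at hm
    | cons y t' =>
      simp only [List.map_cons, List.cons.injEq] at hm
      obtain ⟨hxy, hm⟩ := hm
      simp only [List.countP_cons] at hc
      by_cases hx : x = 0
      · have hy : y = 0 := by by_contra hy; simp [hx, hy] at hxy
        subst hx; subst hy
        rw [wb_cons_zero, wb_cons_zero]
        simp only [if_neg (by simp : ¬((0 : Int) != 0) = true), Nat.add_zero] at hc
        rw [ih t' w hm hc]
      · have hy : ¬ y = 0 := by by_contra hy; simp [hx, hy] at hxy
        rw [if_pos (by simp [hx] : ((x != 0) = true))] at hc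
        cases w with
        | nil => simp at hc
        | cons v w' =>
          rw [wb_cons_nz x t v w' hx, wb_cons_nz y t' v w' hy]
          simp only [List.length_cons, Nat.add_le_add_iff_right] at hc
          rw [ih t' w' hm hc]

lemma sorted_cons_min (v : Int) (zs : List Int) (h : ∀ z ∈ zs, v ≤ z) :
    PySem.List.sorted (v :: zs) (fun x => x) false
      = v :: PySem.List.sorted zs (fun x => x) false := by
  apply PySem.List.sorted_id_eq_of_perm_of_pairwise
  · exact List.Perm.cons v (PySem.List.sorted_perm zs (fun x => x) false)
  · refine List.pairwise_cons.mpr ⟨?_, ?_⟩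
    · intro z hz
      exact h z ((PySem.List.mem_sorted zs (fun x => x) false z).mp hz)
    · exact PySem.List.sorted_pairwise zs (fun x => x)

lemma filter_set_perm (u : List Int) (p : Nat) (a : Int) (hp : p < u.length)
    (ha : a ≠ 0) (hv : u[p] ≠ 0) :
    (a :: u.filter (fun x => x != 0)).Perm
      (u[p] :: (u.set p a).filter (fun x => x != 0)) := by
  have hu : u = u.take p ++ u[p] :: u.drop (p+1) := by
    conv_lhs => rw [← List.take_append_drop p u]
    rw [List.drop_eq_getElem_cons hp]
  rw [List.set_eq_take_cons_drop a hp]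
  conv_lhs => rw [hu]
  simp only [List.filter_append, List.filter_cons]
  rw [if_pos (by simpa using hv), if_pos (by simpa using ha)]
  refine (List.Perm.cons a List.perm_middle).trans ?_
  refine (List.Perm.swap u[p] a _).trans ?_
  exact List.Perm.cons u[p] List.perm_middle.symm

lemma slowInner_spec (s : List Int) (i : Int)
    (hnz : PySem.List.pyGetD s i 0 ≠ 0) :
    ∀ c, i + 1 ≤ c → i ≤ slowInner s i c ∧ slowInner s i c < c ∧
      PySem.List.pyGetD s (slowInner s i c) 0 ≠ 0 ∧
      ∀ j, i ≤ j → j < c → PySem.List.pyGetD s j 0 ≠ 0 →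
        PySem.List.pyGetD s (slowInner s i c) 0 ≤ PySem.List.pyGetD s j 0 := by
  intro c hc
  induction c, hc using Int.le_induction with
  | base =>
    have : slowInner s i (i + 1) = i := by
      simp [slowInner, PySem.List.pyRange_one_singleton, List.foldl]
    rw [this]
    refine ⟨le_refl i, by omega, hnz, ?_⟩
    intro j h1 h2 _
    have : j = i := by omega
    simp [this]
  | succ c hc ih =>
    have hr : PySem.List.pyRange i (c + 1) 1 = PySem.List.pyRange i c 1 ++ [c] :=
      PySem.List.pyRange_one_succ_right (by omega)
    have hdef : slowInner s i (c + 1) =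
        (if PySem.List.pyGetD s c 0 == 0 then slowInner s i c
         else if PySem.List.pyGetD s c 0 < PySem.List.pyGetD s (slowInner s i c) 0 then c
         else slowInner s i c) := by
      simp only [slowInner, hr, List.foldl_append, List.foldl]
    obtain ⟨h1, h2, h3, h4⟩ := ih
    by_cases hz : PySem.List.pyGetD s c 0 = 0
    · rw [hdef, if_pos (by simp [hz])]
      refine ⟨h1, by omega, h3, ?_⟩
      intro j hj1 hj2 hj3
      rcases (by omega : j < c ∨ j = c) with h | h
      · exact h4 j hj1 h hj3
      · exact absurd (h ▸ hz) hj3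
    · rw [hdef, if_neg (by simp [hz])]
      by_cases hlt : PySem.List.pyGetD s c 0 < PySem.List.pyGetD s (slowInner s i c) 0
      · rw [if_pos hlt]
        refine ⟨by omega, by omega, hz, ?_⟩
        intro j hj1 hj2 hj3
        rcases (by omega : j < c ∨ j = c) with h | h
        · exact le_of_lt (lt_of_lt_of_le hlt (h4 j hj1 h hj3))
        · simp [h]
      · rw [if_neg hlt]
        refine ⟨h1, by omega, h3, ?_⟩
        intro j hj1 hj2 hj3
        rcases (by omega : j < c ∨ j = c) with h | h
        · exact h4 j hj1 h hj3
        · rw [h]; omega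

-- lower bound carries over to the non-zero elements of a suffix
lemma min_over_drop (s : List Int) (i : Nat) (V : Int)
    (hmin : ∀ j : Int, (i : Int) ≤ j → j < (s.length : Int) →
      PySem.List.pyGetD s j 0 ≠ 0 → V ≤ PySem.List.pyGetD s j 0) :
    ∀ z ∈ (s.drop i).filter (fun x => x != 0), V ≤ z := by
  intro z hz
  rw [List.mem_filter] at hz
  obtain ⟨hzm, hznz⟩ := hz
  obtain ⟨k, hk, hkz⟩ := List.mem_iff_getElem.mp hzm
  have hk' : i + k < s.length := by
    have := hk; simp [List.length_drop] at this; omega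
  have hzv : z = s[i + k] := by rw [← hkz, List.getElem_drop]
  have hpg : PySem.List.pyGetD s ((i + k : Nat) : Int) 0 = s[i + k] := by
    rw [PySem.List.pyGetD_natCast, List.getD_eq_getElem s 0 hk']
  have := hmin ((i + k : Nat) : Int) (by exact_mod_cast Nat.cast_le.mpr (Nat.le_add_right i k))
    (by exact_mod_cast hk') (by rw [hpg, ← hzv]; simpa using hznz)
  rw [hpg, ← hzv] at this
  exact this


lemma slow_step (s : List Int) (i : Nat) (h : i + 1 < s.length) :
    (slowOuterBody (s.length : Int) s (i : Int)).length = s.length ∧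
    ((slowOuterBody (s.length : Int) s (i : Int)).take (i+1) ++
        slowWriteBack ((slowOuterBody (s.length : Int) s (i : Int)).drop (i+1))
          (sortedNZ ((slowOuterBody (s.length : Int) s (i : Int)).drop (i+1))))
      = s.take i ++ slowWriteBack (s.drop i) (sortedNZ (s.drop i)) := by
  have hi : i < s.length := by omega
  have hgi : PySem.List.pyGetD s (i : Int) 0 = s[i] := by
    rw [PySem.List.pyGetD_natCast, List.getD_eq_getElem s 0 hi]
  have hdropi : s.drop i = s[i] :: s.drop (i+1) := List.drop_eq_getElem_cons hi
  have htakei : s.take i ++ [s[i]] = s.take (i+1) := List.take_append_getElem hi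
  by_cases hz : s[i] = 0
  · -- l[i] == 0: continue
    have hb : slowOuterBody (s.length : Int) s (i : Int) = s := by
      rw [slowOuterBody, if_pos (by simp [hgi, hz])]
    rw [hb]
    refine ⟨rfl, ?_⟩
    rw [hdropi, hz]
    have : sortedNZ (0 :: s.drop (i+1)) = sortedNZ (s.drop (i+1)) := by
      simp [sortedNZ]
    rw [this, wb_cons_zero, ← htakei, hz]
    simp
  · -- l[i] != 0
    have hnz : PySem.List.pyGetD s (i : Int) 0 ≠ 0 := by rw [hgi]; exact hz
    obtain ⟨hm1, hm2, hm3, hm4⟩ := slowInner_spec s (i : Int) hnz ((s.length : Int))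
      (by omega)
    set m := slowInner s (i : Int) (s.length : Int) with hmdef
    have hm0 : 0 ≤ m := le_trans (by positivity) hm1
    have hmN : m = ((m.toNat : Nat) : Int) := by omega
    have hmNlt : m.toNat < s.length := by omega
    have hgm : PySem.List.pyGetD s m 0 = s[m.toNat] := by
      conv_lhs => rw [hmN]
      rw [PySem.List.pyGetD_natCast, List.getD_eq_getElem s 0 hmNlt]
    set v := s[m.toNat] with hvdef
    have hvnz : v ≠ 0 := by rw [← hgm]; exact hm3
    have hmind : ∀ z ∈ (s.drop i).filter (fun x => x != 0), v ≤ z := by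
      apply min_over_drop
      intro j hj1 hj2 hj3
      rw [← hgm]; exact hm4 j hj1 hj2 hj3
    by_cases hmi : m = (i : Int)
    · -- m == i: no swap
      have hb : slowOuterBody (s.length : Int) s (i : Int) = s := by
        rw [slowOuterBody, if_neg (by simp [hgi, hz])]
        simp [← hmdef, hmi]
      rw [hb]
      refine ⟨rfl, ?_⟩
      have hvi : v = s[i] := by rw [hvdef]; exact getElem_congr rfl (by omega : m.toNat = i) hmNlt
      have hsnz : sortedNZ (s.drop i) = v :: sortedNZ (s.drop (i+1)) := by
        rw [sortedNZ, hdropi, List.filter_cons, if_pos (by simpa using hz), ← hvi]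
        rw [sorted_cons_min v _ (fun z hz' => hmind z (by rw [hdropi, List.filter_cons, if_pos (by simpa using hz), ← hvi]; exact List.mem_cons_of_mem v hz'))]
        rfl
      rw [hsnz, hdropi, wb_cons_nz s[i] _ v _ hz, hvi, ← htakei, List.append_assoc,
        List.singleton_append]
    · -- m != i: swap
      have hb : slowOuterBody (s.length : Int) s (i : Int)
          = (s.set i v).set m.toNat s[i] := by
        rw [slowOuterBody, if_neg (by simp [hgi, hz])]
        simp only [← hmdef, if_pos hmi, hgm, hgi]
        conv_lhs => rw [hmN]
        rw [PySem.List.pySetD_natCast, PySem.List.pySetD_natCast]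
      have hilt : i < m.toNat := by omega
      set p := m.toNat - (i+1) with hpdef
      have hp : p < (s.drop (i+1)).length := by simp [List.length_drop]; omega
      have hup : (s.drop (i+1))[p]'hp = v := by
        rw [List.getElem_drop]
        have hidx : i + 1 + p = m.toNat := by omega
        rw [hvdef]
        exact getElem_congr rfl hidx (by omega)
      set u := s.drop (i+1) with hudef
      have hpu : p < u.length := hp
      have hup2 : u[p]'hpu = v := hup
      have hdrop' : ((s.set i v).set m.toNat s[i]).drop (i+1) = u.set p s[i] := by
        rw [List.drop_set, if_neg (by omega)]
        have h2 : (s.set i v).drop (i+1) = s.drop (i+1) := by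
          rw [List.drop_set, if_pos (by omega)]
        rw [h2, ← hudef]
      have htake' : ((s.set i v).set m.toNat s[i]).take (i+1) = s.take i ++ [v] := by
        rw [List.take_set, List.set_eq_of_length_le (by simp [List.length_take]; omega)]
        rw [← List.take_append_getElem (l := s.set i v) (by simpa using hi)]
        rw [List.take_set, List.set_eq_of_length_le (by simp [List.length_take])]
        simp
      have hperm : ((s[i] : Int) :: u.filter (fun x => x != 0)).Perm
          (v :: (u.set p s[i]).filter (fun x => x != 0)) := by
        have := filter_set_perm u p s[i] hpu hz (by rw [hup2]; exact hvnz)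
        rwa [hup2] at this
      have hfiltdrop : (s.drop i).filter (fun x => x != 0) = s[i] :: u.filter (fun x => x != 0) := by
        rw [hdropi, List.filter_cons, if_pos (by simpa using hz)]
      have hmin2 : ∀ z ∈ (u.set p s[i]).filter (fun x => x != 0), v ≤ z := by
        intro z hz'
        have : z ∈ (s[i] : Int) :: u.filter (fun x => x != 0) :=
          hperm.symm.subset (List.mem_cons_of_mem v hz')
        exact hmind z (by rw [hfiltdrop]; exact this)
      have hsnz : sortedNZ (s.drop i) = v :: sortedNZ (u.set p s[i]) := by
        rw [sortedNZ, hfiltdrop]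
        rw [PySem.List.sorted_eq_sorted_of_perm _ _ _ (fun a b hab => hab) hperm]
        rw [sorted_cons_min v _ hmin2]
        rfl
      have hmask : u.map (fun x => x == 0) = (u.set p s[i]).map (fun x => x == 0) := by
        rw [List.map_set]
        have he : ((s[i] : Int) == 0) = ((u[p]'hpu : Int) == 0) := by
          simp [hup2, hz, hvnz]
        rw [he]
        rw [← List.getElem_map (f := fun x => (x == 0)) (h := by simpa using hpu)]
        rw [List.set_getElem_self]
      have hcount : u.countP (fun x => x != 0) ≤ (sortedNZ (u.set p s[i])).length := by
        rw [sortedNZ, PySem.List.length_sorted, ← List.countP_eq_length_filter]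
        have h1 : ((s[i] : Int) :: u.filter (fun x => x != 0)).length
            = (v :: (u.set p s[i]).filter (fun x => x != 0)).length := hperm.length_eq
        simp only [List.length_cons, ← List.countP_eq_length_filter] at h1
        omega
      refine ⟨by rw [hb]; simp, ?_⟩
      rw [hb, hdrop', htake', hsnz, hdropi,
        wb_cons_nz s[i] u v _ hz,
        slowWriteBack_congr u (u.set p s[i]) _ hmask hcount,
        List.append_assoc, List.singleton_append]

lemma wb_singleton (x : Int) : slowWriteBack [x] (sortedNZ [x]) = [x] := by
  by_cases hx : x = 0
  · subst hx
    rw [wb_cons_zero]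
    rfl
  · have h1 : sortedNZ [x] = [x] := by
      rw [sortedNZ, List.filter_cons, if_pos (by simpa using hx)]
      simp only [List.filter_nil]
      exact PySem.List.sorted_eq_self_of_pairwise _ _ (List.pairwise_singleton _ _)
    rw [h1, wb_cons_nz x [] x [] hx]
    rfl

lemma slow_loop (n : Nat) : ∀ (d : Nat) (s : List Int) (i : Nat),
    s.length = n → i + d + 1 = n →
    (PySem.List.pyRange (i : Int) ((n : Int) - 1) 1).foldl (slowOuterBody (n : Int)) s
      = s.take i ++ slowWriteBack (s.drop i) (sortedNZ (s.drop i)) := by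
  intro d
  induction d with
  | zero =>
    intro s i h1 h2
    rw [PySem.List.pyRange_one_eq_nil (by omega)]
    have hi : i < s.length := by omega
    have hdrop : s.drop i = [s[i]] := by
      rw [List.drop_eq_getElem_cons hi, List.drop_eq_nil_of_le (by omega)]
    rw [List.foldl_nil, hdrop, wb_singleton]
    rw [List.take_append_getElem hi, List.take_of_length_le (by omega)]
  | succ d ih =>
    intro s i h1 h2
    have hlt : i + 1 < s.length := by omega
    rw [PySem.List.pyRange_one_cons (by omega), List.foldl_cons]
    obtain ⟨hlen, heq⟩ := slow_step s i hlt
    rw [h1] at hlen heq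
    have hcast : ((i : Int) + 1) = (((i + 1 : Nat) : Nat) : Int) := by push_cast; ring
    rw [hcast, ih (slowOuterBody (n : Int) s (i : Int)) (i+1) (by rw [hlen]) (by omega)]
    exact heq

theorem slow_eq (l : List Int) :
    (let n : Int := l.length;
     (PySem.List.pyRange 0 (n - 1) 1).foldl (slowOuterBody n) l)
      = slowWriteBack l (PySem.List.sorted (l.filter (fun x => x != 0)) (fun x => x) false) := by
  show (PySem.List.pyRange 0 ((l.length : Int) - 1) 1).foldl (slowOuterBody (l.length : Int)) l = _
  cases l with
  | nil => rfl
  | cons x t =>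
    have h0 : ((0 : Int)) = (((0 : Nat) : Nat) : Int) := by norm_num
    rw [h0, slow_loop (x :: t).length ((x :: t).length - 1) (x :: t) 0 rfl (by simp)]
    simp only [List.take_zero, List.drop_zero, List.nil_append]
    rfl

-- ===== VERDICT (by name: the statement is the Claim_ definition above) =====
theorem slow_spec : Claim_equal_slow := by
  intro l _
  show slow l = slow_alt l
  exact slow_eq l
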